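-- pv_equiv track=rewrite | github.com/yasmercy1337/SchemeInterpreter | src/code_parser.py | group_blocks
-- ===== SOURCE A (Python) =====
-- def group_blocks(code: str, delim: str = " ") -> list[str]:
--     out = []
--     count = 0
--     current = ""
--
--     for char in code:
--         count += (char == "(") - (char == ")") + (char == "[") - (char == "]")
--         if char == delim and count == 0:
--             out.append(current)
--             current = ""
--             continue
--         current += char
--
--     if current:
--         out.append(current)
--
--     return out
-- ===== SOURCE B (Python) =====
-- def group_blocks(code: str, delim: str = " ") -> list[str]:
--     # Pass 1: find the indices of all top-level (bracket depth 0) delimiters.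
--     splits = []
--     depth = 0
--     for i, ch in enumerate(code):
--         depth += (ch == "(") - (ch == ")") + (ch == "[") - (ch == "]")
--         if ch == delim and depth == 0:
--             splits.append(i)
--     # Pass 2: slice the code at the split points.
--     blocks = []
--     start = 0
--     for i in splits:
--         blocks.append(code[start:i])
--         start = i + 1
--     tail = code[start:]
--     if tail:
--         blocks.append(tail)
--     return blocks
-- ===== Notes on version B (the rewrite author's own statement) =====
-- stated objective: alternative
-- what changed: Replaces A's single accumulator loop by a two-pass index scheme: first collect the indices of all zero-depth delimiters, then slice the string at those indices (appending the tail only when nonempty).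
import Mathlib
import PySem

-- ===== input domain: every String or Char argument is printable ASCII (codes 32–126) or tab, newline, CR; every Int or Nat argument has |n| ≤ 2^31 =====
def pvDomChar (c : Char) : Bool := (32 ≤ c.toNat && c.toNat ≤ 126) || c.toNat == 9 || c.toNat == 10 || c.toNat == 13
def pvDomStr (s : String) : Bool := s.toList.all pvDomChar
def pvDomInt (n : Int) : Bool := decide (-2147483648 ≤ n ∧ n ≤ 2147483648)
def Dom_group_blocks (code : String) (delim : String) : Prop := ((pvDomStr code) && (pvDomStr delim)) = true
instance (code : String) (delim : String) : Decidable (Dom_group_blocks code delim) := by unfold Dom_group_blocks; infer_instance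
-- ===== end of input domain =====

-- B: a two-pass re-implementation (collect zero-depth split indices, then slice);
-- same O(n) cost, different structure; return values proved equal.

-- ===== PORT A =====
-- the per-char bracket delta (ch=="(") - (ch==")") + (ch=="[") - (ch=="]")
def gbDelta (c : Char) : Int :=
  (if c = '(' then 1 else 0) - (if c = ')' then 1 else 0)
    + (if c = '[' then 1 else 0) - (if c = ']' then 1 else 0)

-- A's for-loop: state (out, count, current), current kept as chars
def gbLoop (delim : String) : List Char → List String → Int → List Char → List String
  | [], out, _, cur => if cur = [] then out else out ++ [String.mk cur]
  | c :: cs, out, count, cur =>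
      let count' := count + gbDelta c
      if String.mk [c] = delim ∧ count' = 0 then
        gbLoop delim cs (out ++ [String.mk cur]) count' []
      else
        gbLoop delim cs out count' (cur ++ [c])

def group_blocks (code : String) (delim : String) : List String :=
  gbLoop delim code.toList [] 0 []

-- ===== PORT B =====
-- B's per-char bracket delta (ch=="(") - (ch==")") + (ch=="[") - (ch=="]")
def gbDelta' (c : Char) : Int :=
  (if c = '(' then 1 else 0) - (if c = ')' then 1 else 0)
    + (if c = '[' then 1 else 0) - (if c = ']' then 1 else 0)

-- enumerate(code) starting at k
def gbEnumFrom : Nat → List Char → List (Nat × Char)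
  | _, [] => []
  | k, c :: cs => (k, c) :: gbEnumFrom (k + 1) cs

-- pass 1: indices of top-level (zero-depth) delimiters
def gbSplits (delim : String) : List (Nat × Char) → Int → List Nat
  | [], _ => []
  | (i, c) :: rest, depth =>
      let d := depth + gbDelta' c
      if String.mk [c] = delim ∧ d = 0 then i :: gbSplits delim rest d
      else gbSplits delim rest d

-- pass-2 step: blocks.append(code[start:i]); start = i+1
-- (code[start:i] with 0 ≤ start ≤ i is exactly drop/take)
def gbCut (cs : List Char) (st : List String × Nat) (i : Nat) : List String × Nat :=
  (st.1 ++ [String.mk ((cs.drop st.2).take (i - st.2))], i + 1)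

def group_blocks_alt (code : String) (delim : String) : List String :=
  let cs := code.toList
  let splits := gbSplits delim (gbEnumFrom 0 cs) 0
  let st := splits.foldl (gbCut cs) ([], 0)
  let tail := cs.drop st.2     -- code[start:]
  if tail = [] then st.1 else st.1 ++ [String.mk tail]

-- ===== PRECONDITION & SPEC =====
def Spec_group_blocks (code : String) (delim : String) (out : List String) : Prop := out = group_blocks_alt code delim
instance (code : String) (delim : String) (out : List String) : Decidable (Spec_group_blocks code delim out) := by unfold Spec_group_blocks; infer_instance

-- ===== CLAIM (what is proved, stated in full; the proofs are below) =====
def Claim_equal_group_blocks : Prop := ∀ (code : String) (delim : String), Dom_group_blocks code delim → Spec_group_blocks code delim (group_blocks code delim)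

-- ===== LEMMAS AND PROOFS =====

-- reference form for A: the block list (as char lists, in order) of a suffix at a given depth
def gbG (delim : String) : List Char → Int → List (List Char)
  | [], _ => []
  | c :: cs, count =>
      let count' := count + gbDelta c
      let rest := gbG delim cs count'
      if String.mk [c] = delim ∧ count' = 0 then [] :: rest
      else match rest with
        | [] => [[c]]
        | h :: t => (c :: h) :: t

-- prepend pending chars onto the first block; drop an empty lone pending block
def gbCons (cur : List Char) (l : List (List Char)) : List (List Char) :=
  match l with
  | [] => if cur = [] then [] else [cur]
  | h :: t => (cur ++ h) :: t

theorem gbCons_nil (l : List (List Char)) : gbCons [] l = l := by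
  cases l <;> simp [gbCons]

theorem gbLoop_eq_G (delim : String) (cs : List Char) :
    ∀ (out : List String) (count : Int) (cur : List Char),
      gbLoop delim cs out count cur = out ++ (gbCons cur (gbG delim cs count)).map String.mk := by
  induction cs with
  | nil =>
      intro out count cur
      simp only [gbLoop, gbG, gbCons]
      split_ifs <;> simp
  | cons c cs ih =>
      intro out count cur
      simp only [gbLoop, gbG]
      by_cases h : String.mk [c] = delim ∧ count + gbDelta c = 0
      · simp only [if_pos h, ih, gbCons_nil]
        simp [gbCons]
      · simp only [if_neg h, ih]
        rcases hG : gbG delim cs (count + gbDelta c) with _ | ⟨b, t⟩ <;>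
          simp [gbCons]

-- reference form for B: (first segment, remaining segments) of a suffix at a given depth
def gbSegs (delim : String) : List Char → Int → List Char × List (List Char)
  | [], _ => ([], [])
  | c :: cs, count =>
      let d := count + gbDelta c
      let r := gbSegs delim cs d
      if String.mk [c] = delim ∧ d = 0 then ([], r.1 :: r.2)
      else (c :: r.1, r.2)

theorem gbDelta'_eq (c : Char) : gbDelta' c = gbDelta c := rfl

-- the default of getLastD is irrelevant on a nonempty list
theorem gbLast_irrel (x : List Char) (xs : List (List Char)) (d d' : List Char) :
    (x :: xs).getLastD d = (x :: xs).getLastD d' := by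
  induction xs generalizing x with
  | nil => simp
  | cons y ys ih => simpa [List.getLastD_cons] using ih y

-- A's reference form = B's segments with an empty trailing segment dropped
theorem gbG_eq_segs (delim : String) (cs : List Char) : ∀ (count : Int),
    gbG delim cs count =
      (if ((gbSegs delim cs count).2.getLastD (gbSegs delim cs count).1) = []
       then ((gbSegs delim cs count).1 :: (gbSegs delim cs count).2).dropLast
       else (gbSegs delim cs count).1 :: (gbSegs delim cs count).2) := by
  induction cs with
  | nil => intro count; simp [gbG, gbSegs]
  | cons c cs ih =>
      intro count
      simp only [gbG, gbSegs]
      by_cases h : String.mk [c] = delim ∧ count + gbDelta c = 0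
      · simp only [if_pos h, ih]
        rcases hS : gbSegs delim cs (count + gbDelta c) with ⟨h1, t1⟩
        simp only [List.getLastD_cons]
        cases t1 with
        | nil => by_cases he : h1 = [] <;> simp [List.getLastD, he]
        | cons x xs =>
            by_cases he : (x :: xs).getLastD h1 = [] <;>
              simp [List.getLastD_eq_getLast?] at * <;> simp [he]
      · simp only [if_neg h, ih]
        rcases hS : gbSegs delim cs (count + gbDelta c) with ⟨h1, t1⟩
        simp only
        cases t1 with
        | nil => by_cases he : h1 = [] <;> simp [List.getLastD, he]
        | cons x xs =>
            rw [show ((x :: xs).getLastD (c :: h1) : List Char)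
                = (x :: xs).getLastD h1 from gbLast_irrel x xs _ _]
            by_cases he : (x :: xs).getLast?.getD h1 = [] <;>
              simp [List.getLastD_eq_getLast?, he]

-- with drop k full = c :: rest, extending the taken window by one picks up c
theorem gbTake_succ (full : List Char) (c : Char) (rest : List Char)
    (k start : Nat) (hsk : start ≤ k) (h : full.drop k = c :: rest) :
    (full.drop start).take (k + 1 - start) = (full.drop start).take (k - start) ++ [c] := by
  have hd : (full.drop start).drop (k - start) = c :: rest := by
    rw [List.drop_drop]
    have : start + (k - start) = k := by omega
    rw [this, h]
  have : k + 1 - start = (k - start) + 1 := by omega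
  rw [this, List.take_add, hd]
  simp

-- the main bridge: pass 2 over the split indices of a suffix reproduces the segments
theorem gbFold_eq (delim : String) (full : List Char) (cs : List Char) :
    ∀ (count : Int) (k start : Nat) (acc : List String),
      start ≤ k → full.drop k = cs →
      ∃ s,
        (gbSplits delim (gbEnumFrom k cs) count).foldl (gbCut full) (acc, start)
          = (acc ++ ((((full.drop start).take (k - start) ++ (gbSegs delim cs count).1)
                        :: (gbSegs delim cs count).2).dropLast.map String.mk), s)
        ∧ full.drop s
            = (gbSegs delim cs count).2.getLastD
                ((full.drop start).take (k - start) ++ (gbSegs delim cs count).1) := by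
  induction cs with
  | nil =>
      intro count k start acc hsk hfull
      refine ⟨start, ?_, ?_⟩
      · simp [gbEnumFrom, gbSplits, gbSegs]
      · have hlen : (full.drop start).length ≤ k - start := by
          have : (full.drop start).drop (k - start) = [] := by
            rw [List.drop_drop]
            have : start + (k - start) = k := by omega
            rw [this, hfull]
          have := List.drop_eq_nil_iff.mp this
          omega
        simp [gbSegs, List.getLastD, List.take_of_length_le hlen]
  | cons c cs ih =>
      intro count k start acc hsk hfull
      have hfull' : full.drop (k + 1) = cs := by
        have : full.drop (k+1) = (full.drop k).drop 1 := by
          rw [List.drop_drop]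
        rw [this, hfull]; rfl
      simp only [gbEnumFrom, gbSplits, gbSegs, gbDelta'_eq]
      by_cases h : String.mk [c] = delim ∧ count + gbDelta c = 0
      · simp only [if_pos h]
        obtain ⟨s, h1, h2⟩ := ih (count + gbDelta c) (k+1) (k+1)
          (acc ++ [String.mk ((full.drop start).take (k - start))]) (le_refl _) hfull'
        refine ⟨s, ?_, ?_⟩
        · rw [List.foldl_cons]
          show List.foldl (gbCut full) (gbCut full (acc, start) k) _ = _
          rw [show gbCut full (acc, start) k
              = (acc ++ [String.mk ((full.drop start).take (k - start))], k + 1) from rfl]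
          rw [h1]
          rcases hS : gbSegs delim cs (count + gbDelta c) with ⟨a1, t1⟩
          cases t1 <;> simp
        · rw [h2]
          rcases hS : gbSegs delim cs (count + gbDelta c) with ⟨a1, t1⟩
          cases t1 with
          | nil => simp
          | cons x xs =>
              simp only [List.getLastD_eq_getLast?, List.getLast?_cons_cons]
              simpa [List.getLastD_eq_getLast?] using
                gbLast_irrel x xs a1 (List.take (k - start) (List.drop start full))
      · simp only [if_neg h]
        obtain ⟨s, h1, h2⟩ := ih (count + gbDelta c) (k+1) start acc (by omega) hfull'
        rw [gbTake_succ full c cs k start hsk hfull] at h1 h2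
        refine ⟨s, ?_, ?_⟩
        · rw [h1]; simp
        · rw [h2]; simp

-- a nonempty mapped list is its dropLast plus its (getLastD-style) last element
theorem gbLast_split (a : List Char) (t : List (List Char)) :
    List.map String.mk (a :: t) =
      (List.map String.mk (a :: t)).dropLast ++ [String.mk (t.getLastD a)] := by
  induction t generalizing a with
  | nil => simp
  | cons x xs ih =>
      simp only [List.map_cons, List.getLastD_cons]
      simp only [List.map_cons] at ih
      rw [List.dropLast_cons₂]
      simpa using ih x

-- ===== VERDICT (by name: the statement is the Claim_ definition above) =====
theorem group_blocks_spec : Claim_equal_group_blocks := by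
  intro code delim _
  unfold Spec_group_blocks group_blocks group_blocks_alt
  obtain ⟨s, h1, h2⟩ := gbFold_eq delim code.toList code.toList 0 0 0 [] (le_refl _) rfl
  simp only [List.take_zero, List.drop_zero, Nat.sub_self, List.nil_append] at h1 h2
  simp only [h1, gbLoop_eq_G, gbCons_nil, gbG_eq_segs, List.nil_append]
  rcases hS : gbSegs delim code.toList 0 with ⟨a1, t1⟩
  rw [hS] at h2
  simp only at h1 h2 ⊢
  rw [h2]
  by_cases he : t1.getLast?.getD a1 = []
  · simp [List.getLastD_eq_getLast?, he, List.map_dropLast]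
  · simp only [List.getLastD_eq_getLast?, he, if_neg, not_false_iff]
    conv_lhs => rw [gbLast_split a1 t1]
    simp [List.getLastD_eq_getLast?]
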